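-- pv_equiv track=rewrite | github.com/ZhuGuoLiang-gi/mmp9-sequence-generation | mmp9/inference/infer_gflownet_fasta.py | parse_annotated_sequence
-- ===== SOURCE A (Python) =====
-- from typing import Dict, List, Set, Tuple
--
-- def parse_annotated_sequence(raw_seq: str) -> tuple[str, Dict[int, str]]:
--     """
--     Parse sequence annotations like <A>/<a>:
--     - output normalized sequence with angle brackets removed
--     - return fixed position constraints, e.g. {idx: "A"}
--     """
--     seq = raw_seq.strip()
--     fixed_positions: Dict[int, str] = {}
--     out_chars: List[str] = []
--     i = 0
--     while i < len(seq):
--         if seq[i] == "<":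
--             j = seq.find(">", i + 1)
--             if j == -1:
--                 raise ValueError(f"Invalid annotation in sequence: {raw_seq}")
--             token = seq[i + 1 : j].strip()
--             if len(token) != 1 or not token.isalpha():
--                 raise ValueError(f"Only single amino-acid annotation is supported, got <{token}> in: {raw_seq}")
--             aa = token.upper()
--             pos = len(out_chars)
--             out_chars.append(aa)
--             fixed_positions[pos] = aa
--             i = j + 1
--             continue
--         out_chars.append(seq[i].upper())
--         i += 1
--     return "".join(out_chars), fixed_positions
-- ===== SOURCE B (Python) =====
-- def parse_annotated_sequence(raw_seq: str) -> tuple[str, dict]: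
--     """Split-based rewrite: cut the stripped sequence at every '<';
--     each piece after the first must start with 'token>'."""
--     seq = raw_seq.strip()
--     parts = seq.split("<")
--     out = parts[0].upper()
--     fixed_positions = {}
--     for part in parts[1:]:
--         k = part.find(">")
--         if k == -1:
--             raise ValueError(f"Invalid annotation in sequence: {raw_seq}")
--         token = part[:k].strip()
--         if len(token) != 1 or not token.isalpha():
--             raise ValueError(f"Only single amino-acid annotation is supported, got <{token}> in: {raw_seq}")
--         aa = token.upper()
--         fixed_positions[len(out)] = aa
--         out += aa + part[k + 1:].upper()
--     return out, fixed_positions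
-- ===== Notes on version B (the rewrite author's own statement) =====
-- stated objective: idiomatic
-- what changed: A's per-character index-driven while loop with manual find('>', i+1) jumps is replaced by splitting the stripped string once at every '<' and processing each resulting piece (annotation token up to its first '>', then the plain tail).
import Mathlib
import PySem

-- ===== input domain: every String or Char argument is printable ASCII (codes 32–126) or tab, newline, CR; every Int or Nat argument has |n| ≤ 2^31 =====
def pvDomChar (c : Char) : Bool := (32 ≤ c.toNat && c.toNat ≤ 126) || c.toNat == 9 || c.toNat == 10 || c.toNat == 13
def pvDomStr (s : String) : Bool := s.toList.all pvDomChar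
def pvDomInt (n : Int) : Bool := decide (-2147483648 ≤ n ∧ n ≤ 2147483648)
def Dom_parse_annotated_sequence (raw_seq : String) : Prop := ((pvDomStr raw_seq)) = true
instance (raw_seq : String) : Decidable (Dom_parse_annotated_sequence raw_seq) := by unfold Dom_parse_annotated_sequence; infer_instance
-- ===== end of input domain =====

-- B replaces A's per-character while loop (with seq.find(">", i+1) and manual jumps)
-- by splitting the stripped sequence once at every '<' and processing each piece;
-- objective: idiomatic, measured faster by a constant factor; return value equal wherever A returns.

-- Shared helper: the split of a char list at its FIRST '>' — (before, after), none if no '>'.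
-- (Both Pythons call .find(">") and then slice; this is that find+slice pair, exact.)
def findGt : List Char → Option (List Char × List Char)
  | [] => none
  | c :: rest =>
    if c = '>' then some ([], rest)
    else match findGt rest with
      | none => none
      | some (b, a) => some (c :: b, a)

-- used by goA's decreasing_by
theorem findGt_some_spec {cs t a : List Char} (h : findGt cs = some (t, a)) :
    cs = t ++ '>' :: a ∧ '>' ∉ t := by
  induction cs generalizing t a with
  | nil => simp [findGt] at h
  | cons c rest ih =>
    by_cases hc : c = '>'
    · simp [findGt, hc] at h
      obtain ⟨h1, h2⟩ := h
      subst h1; subst h2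
      simp [hc]
    · simp only [findGt, if_neg hc] at h
      cases hfg : findGt rest with
      | none => rw [hfg] at h; simp at h
      | some p =>
        obtain ⟨b, a0⟩ := p
        rw [hfg] at h
        simp only [Option.some.injEq, Prod.mk.injEq] at h
        obtain ⟨h1, h2⟩ := h
        obtain ⟨hr, hnb⟩ := ih hfg
        subst h1; subst h2; subst hr
        refine ⟨rfl, ?_⟩
        simp [hnb]
        exact fun h => hc h.symm

theorem findGt_some_len {cs t a : List Char} (h : findGt cs = some (t, a)) :
    a.length < cs.length := by
  obtain ⟨hcs, -⟩ := findGt_some_spec h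
  subst hcs; simp; omega

-- ===== PORT A =====
-- A's while loop over the stripped string: at '<' find the matching '>', validate the
-- token, record the fixed position; otherwise append the uppercased char.
-- Where Python A raises ValueError the port returns ("", []) — those inputs are outside Pre_.
def goA (cs : List Char) (out : List Char) (fp : PySem.Dict Int String) :
    String × (List (Int × String)) :=
  match cs with
  | [] => (String.ofList out, fp.items)
  | c :: rest =>
    if c = '<' then
      match h2 : findGt rest with
      | none => ("", [])                         -- ValueError: invalid annotation
      | some (tok, after) =>
        let token := PySem.Chars.strip tok
        if token.length == 1 && PySem.Chars.strIsalpha token then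
          goA after (out ++ PySem.Chars.upper token)
            (fp.insert (out.length : Int) (String.ofList (PySem.Chars.upper token)))
        else ("", [])                            -- ValueError: not a single amino acid
    else goA rest (out ++ [PySem.Chars.upperChar c]) fp
termination_by cs.length
decreasing_by
  · simpa using Nat.lt_succ_of_lt (findGt_some_len h2)
  · simp

def parse_annotated_sequence (raw_seq : String) : String × (List (Int × String)) :=
  goA (PySem.Str.strip raw_seq).toList [] PySem.Dict.empty

-- ===== PORT B =====
-- Source B: seq.split("<") — hand port of str.split for the single-char separator "<", exact.
def splitLt : List Char → List (List Char)
  | [] => [[]]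
  | c :: rest =>
    if c = '<' then [] :: splitLt rest
    else match splitLt rest with
      | [] => [[c]]            -- unreachable: splitLt never returns []
      | p :: ps => (c :: p) :: ps

-- Source B's for-loop over parts[1:]
def goB (parts : List (List Char)) (out : List Char) (fp : PySem.Dict Int String) :
    String × (List (Int × String)) :=
  match parts with
  | [] => (String.ofList out, fp.items)
  | part :: ps =>
    match findGt part with                        -- part.find(">"), part[:k], part[k+1:]
    | none => ("", [])                            -- ValueError: invalid annotation
    | some (tok, after) =>
      let token := PySem.Chars.strip tok
      if token.length == 1 && PySem.Chars.strIsalpha token then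
        goB ps (out ++ PySem.Chars.upper token ++ PySem.Chars.upper after)
          (fp.insert (out.length : Int) (String.ofList (PySem.Chars.upper token)))
      else ("", [])                               -- ValueError: not a single amino acid

def parse_annotated_sequence_alt (raw_seq : String) : String × (List (Int × String)) :=
  match splitLt (PySem.Str.strip raw_seq).toList with
  | [] => ("", [])             -- unreachable: split never returns []
  | first :: rest => goB rest (PySem.Chars.upper first) PySem.Dict.empty

-- ===== PRECONDITION & SPEC =====
-- Pre_ = exactly the inputs on which Python A returns (no ValueError): in the stripped
-- input, every occurrence of '<' is followed by some '>', and the segment between the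
-- '<' and the first such '>' strips to exactly one alphabetic character.
def Pre_parse_annotated_sequence (raw_seq : String) : Prop :=
  ∀ i : Fin (PySem.Str.strip raw_seq).toList.length,
    (PySem.Str.strip raw_seq).toList[i] = '<' →
      ('>' ∈ (PySem.Str.strip raw_seq).toList.drop (i + 1) ∧
       (PySem.Chars.strip (((PySem.Str.strip raw_seq).toList.drop (i + 1)).takeWhile
          (fun c => c ≠ '>'))).length = 1 ∧
       PySem.Chars.strIsalpha (PySem.Chars.strip (((PySem.Str.strip raw_seq).toList.drop
          (i + 1)).takeWhile (fun c => c ≠ '>'))) = true)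

instance (raw_seq : String) : Decidable (Pre_parse_annotated_sequence raw_seq) := by
  unfold Pre_parse_annotated_sequence; infer_instance

def pvWitness_parse_annotated_sequence : String := " ag<d>k< e >w "

def Spec_parse_annotated_sequence (raw_seq : String) (out : String × (List (Int × String))) : Prop := out = parse_annotated_sequence_alt raw_seq
instance (raw_seq : String) (out : String × (List (Int × String))) : Decidable (Spec_parse_annotated_sequence raw_seq out) := by unfold Spec_parse_annotated_sequence; infer_instance

-- ===== CLAIM (what is proved, stated in full; the proofs are below) =====
def Claim_equal_parse_annotated_sequence : Prop := ∀ (raw_seq : String), Dom_parse_annotated_sequence raw_seq → Pre_parse_annotated_sequence raw_seq → Spec_parse_annotated_sequence raw_seq (parse_annotated_sequence raw_seq)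

-- ===== LEMMAS AND PROOFS =====

theorem splitLt_ne_nil (cs : List Char) : splitLt cs ≠ [] := by
  induction cs with
  | nil => simp [splitLt]
  | cons c rest ih =>
    by_cases hc : c = '<'
    · simp [splitLt, hc]
    · cases h : splitLt rest with
      | nil => simp [splitLt, hc, h]
      | cons p ps => simp [splitLt, hc, h]

theorem findGt_append_gtFree {z : List Char} (a : List Char) (ha : '>' ∉ a) :
    findGt (a ++ z) = (findGt z).map (fun ta => (a ++ ta.1, ta.2)) := by
  induction a with
  | nil =>
    cases hz : findGt z with
    | none => simp [hz]
    | some p => simp [hz]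
  | cons c a' ih =>
    have hc : ¬ c = '>' := fun h => ha (by simp [h])
    have ha' : '>' ∉ a' := fun h => ha (List.mem_cons_of_mem _ h)
    cases hz : findGt z with
    | none => simp [findGt, hc, ih ha', hz]
    | some p => simp [findGt, hc, ih ha', hz]

theorem findGt_none_iff {cs : List Char} : findGt cs = none ↔ '>' ∉ cs := by
  induction cs with
  | nil => simp [findGt]
  | cons c rest ih =>
    by_cases hc : c = '>'
    · simp [findGt, hc]
    · cases h : findGt rest with
      | none => simp [findGt, hc, h, ih.mp h, Ne.symm hc]
      | some p =>
        simp only [findGt, if_neg hc, h]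
        constructor
        · intro hcontra; cases hcontra
        · intro hmem
          exfalso
          have hmr : '>' ∈ rest := by
            by_contra hn
            rw [ih.mpr hn] at h; cases h
          exact absurd (List.mem_cons_of_mem c hmr) hmem

theorem splitLt_cons_decomp {cs : List Char} {p : List Char} {ps : List (List Char)}
    (h : splitLt cs = p :: ps) :
    '<' ∉ p ∧ (ps = [] → cs = p) ∧
      (∀ q qs, ps = q :: qs → ∃ w, cs = p ++ '<' :: w ∧ splitLt w = ps) := by
  induction cs generalizing p ps with
  | nil =>
    simp [splitLt] at h
    obtain ⟨h1, h2⟩ := h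
    subst h1; subst h2
    simp
  | cons c rest ih =>
    by_cases hc : c = '<'
    · subst hc
      have h' : [] :: splitLt rest = p :: ps := by rw [← h]; simp [splitLt]
      injection h' with h1 h2
      subst h1
      refine ⟨by simp, ?_, ?_⟩
      · intro hnil; rw [hnil] at h2; exact absurd h2 (splitLt_ne_nil rest)
      · intro q qs hqqs
        exact ⟨rest, by simp, h2⟩
    · cases hrest : splitLt rest with
      | nil => exact absurd hrest (splitLt_ne_nil rest)
      | cons p' ps' =>
        simp only [splitLt, if_neg hc, hrest, List.cons.injEq] at h
        obtain ⟨h1, h2⟩ := h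
        subst h2
        obtain ⟨ih1, ih2, ih3⟩ := ih hrest
        refine ⟨?_, ?_, ?_⟩
        · rw [← h1]
          intro hmem
          rcases List.mem_cons.mp hmem with heq | hmem'
          · exact hc heq.symm
          · exact ih1 hmem'
        · intro hnil; rw [← h1, ih2 hnil]
        · intro q qs hqqs
          obtain ⟨w, hw1, hw2⟩ := ih3 q qs hqqs
          exact ⟨w, by rw [← h1, hw1]; simp, hw2⟩

theorem splitLt_noLt {a : List Char} (ha : '<' ∉ a) : splitLt a = [a] := by
  induction a with
  | nil => simp [splitLt]
  | cons c a' ih =>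
    have hc : ¬ c = '<' := fun h => ha (by simp [h])
    have ha' : '<' ∉ a' := fun h => ha (List.mem_cons_of_mem _ h)
    simp [splitLt, hc, ih ha']

theorem splitLt_append_noLt {a w : List Char} (ha : '<' ∉ a) :
    splitLt (a ++ '<' :: w) = a :: splitLt w := by
  induction a with
  | nil => simp [splitLt]
  | cons c a' ih =>
    have hc : ¬ c = '<' := fun h => ha (by simp [h])
    have ha' : '<' ∉ a' := fun h => ha (List.mem_cons_of_mem _ h)
    simp [splitLt, hc, ih ha']

theorem mem_dropWhile_of_mem {α : Type} {p : α → Bool} {c : α} :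
    ∀ {l : List α}, c ∈ l → p c = false → c ∈ l.dropWhile p := by
  intro l
  induction l with
  | nil => simp
  | cons x xs ih =>
    intro hmem hc
    by_cases hx : p x = true
    · rw [List.dropWhile_cons_of_pos hx]
      rcases List.mem_cons.mp hmem with h | h
      · subst h; rw [hx] at hc; cases hc
      · exact ih h hc
    · rw [List.dropWhile_cons_of_neg hx]
      exact hmem

theorem mem_strip_of_not_space {c : Char} {cs : List Char} (h : c ∈ cs)
    (hs : PySem.Chars.isspace c = false) : c ∈ PySem.Chars.strip cs := by
  unfold PySem.Chars.strip PySem.Chars.rstrip PySem.Chars.lstrip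
  rw [List.mem_reverse]
  exact mem_dropWhile_of_mem (List.mem_reverse.mpr (mem_dropWhile_of_mem h hs)) hs

theorem strIsalpha_false_of_mem_lt {cs : List Char} (h : '<' ∈ cs) :
    PySem.Chars.strIsalpha (PySem.Chars.strip cs) = false := by
  have hm := mem_strip_of_not_space h (by decide)
  have hall : (PySem.Chars.strip cs).all PySem.Chars.isalpha = false :=
    List.all_eq_false.mpr ⟨'<', hm, by decide⟩
  unfold PySem.Chars.strIsalpha
  simp [hall]

-- unfolding equations for goA (well-founded recursion)
theorem goA_nil (out : List Char) (fp : PySem.Dict Int String) :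
    goA [] out fp = (String.ofList out, fp.items) := by
  rw [goA.eq_def]

theorem goA_cons_ne (c : Char) (rest out : List Char) (fp : PySem.Dict Int String)
    (hc : ¬ c = '<') : goA (c :: rest) out fp = goA rest (out ++ [PySem.Chars.upperChar c]) fp := by
  rw [goA.eq_def]; simp [hc]

theorem goA_lt_none (rest out : List Char) (fp : PySem.Dict Int String)
    (h : findGt rest = none) : goA ('<' :: rest) out fp = ("", []) := by
  rw [goA.eq_def]
  split
  · rename_i x heq; simp at heq
  · rename_i x c' rest' heq
    injection heq with hc hrest
    subst hc; subst hrest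
    rw [if_pos rfl]
    split
    · rfl
    · rename_i tok after h2
      simp [h] at h2

theorem goA_lt_some (rest tok after out : List Char) (fp : PySem.Dict Int String)
    (h : findGt rest = some (tok, after)) :
    goA ('<' :: rest) out fp =
      (if (PySem.Chars.strip tok).length == 1 && PySem.Chars.strIsalpha (PySem.Chars.strip tok) then
        goA after (out ++ PySem.Chars.upper (PySem.Chars.strip tok))
          (fp.insert (out.length : Int) (String.ofList (PySem.Chars.upper (PySem.Chars.strip tok))))
      else ("", [])) := by
  rw [goA.eq_def]
  split
  · rename_i x heq; simp at heq
  · rename_i x c' rest' heq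
    injection heq with hc hrest
    subst hc; subst hrest
    rw [if_pos rfl]
    split
    · rename_i h2
      simp [h] at h2
    · rename_i tok' after' h2
      rw [h] at h2
      injection h2 with h3
      injection h3 with h4 h5
      subst h4; subst h5
      rfl

-- the heart: A's scan equals B's per-part fold, for every input
theorem goA_eq_goB : ∀ (n : Nat) (cs : List Char), cs.length ≤ n → ∀ out fp,
    goA cs out fp =
      (match splitLt cs with
       | [] => ("", [])
       | p :: ps => goB ps (out ++ PySem.Chars.upper p) fp) := by
  intro n
  induction n with
  | zero =>
    intro cs hcs out fp
    have hnil : cs = [] := List.eq_nil_of_length_eq_zero (Nat.le_zero.mp hcs)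
    subst hnil
    simp [goA_nil, splitLt, goB, PySem.Chars.upper]
  | succ n ih =>
    intro cs hcs out fp
    match cs with
    | [] => simp [goA_nil, splitLt, goB, PySem.Chars.upper]
    | c :: rest =>
      by_cases hc : c = '<'
      · subst hc
        obtain ⟨p, ps, hsp⟩ : ∃ p ps, splitLt rest = p :: ps := by
          cases h : splitLt rest with
          | nil => exact absurd h (splitLt_ne_nil rest)
          | cons p ps => exact ⟨p, ps, rfl⟩
        have hsplit : splitLt ('<' :: rest) = [] :: p :: ps := by simp [splitLt, hsp]
        rw [hsplit]
        obtain ⟨hpLt, hnilcase, hconscase⟩ := splitLt_cons_decomp hsp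
        have hlen : rest.length ≤ n := by simpa using hcs
        cases hfp : findGt p with
        | none =>
          have hgtp : '>' ∉ p := findGt_none_iff.mp hfp
          cases ps with
          | nil =>
            have hrp : rest = p := hnilcase rfl
            subst hrp
            rw [goA_lt_none _ _ _ hfp]
            simp [goB, hfp]
          | cons q qs =>
            obtain ⟨w, hrw, hw⟩ := hconscase q qs rfl
            subst hrw
            have hfr := findGt_append_gtFree (z := '<' :: w) p hgtp
            cases hfw : findGt ('<' :: w) with
            | none =>
              rw [goA_lt_none _ _ _ (by rw [hfr, hfw]; rfl)]
              simp [goB, hfp]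
            | some ta =>
              obtain ⟨t, aft⟩ := ta
              obtain ⟨ht, -⟩ := findGt_some_spec hfw
              have htlt : '<' ∈ t := by
                cases t with
                | nil => simp at ht
                | cons t0 ts =>
                  have ht0 : t0 = '<' := by
                    have := congrArg (fun l => l.head?) ht
                    simpa using this.symm
                  simp [ht0]
              have hbad : PySem.Chars.strIsalpha (PySem.Chars.strip (p ++ t)) = false :=
                strIsalpha_false_of_mem_lt (by simp [htlt])
              rw [goA_lt_some _ _ _ _ _ (by rw [hfr, hfw]; rfl)]
              simp [goB, hfp, hbad]
        | some pa =>
          obtain ⟨tok, a⟩ := pa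
          obtain ⟨hp, hgt⟩ := findGt_some_spec hfp
          have hlta : '<' ∉ a := fun hmem => hpLt (by rw [hp]; simp [hmem])
          cases ps with
          | nil =>
            have hrp : rest = p := hnilcase rfl
            subst hrp
            rw [goA_lt_some _ _ _ _ _ hfp]
            by_cases hval : ((PySem.Chars.strip tok).length == 1 &&
                PySem.Chars.strIsalpha (PySem.Chars.strip tok)) = true
            · rw [if_pos hval]
              have hla : a.length ≤ n := by
                rw [hp] at hlen; simp at hlen; omega
              rw [ih a hla]
              rw [splitLt_noLt hlta]
              simp [goB, hfp, hval, PySem.Chars.upper]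
            · rw [if_neg hval]
              simp [goB, hfp, hval]
          | cons q qs =>
            obtain ⟨w, hrw, hw⟩ := hconscase q qs rfl
            subst hrw
            have hfr : findGt (p ++ '<' :: w) = some (tok, a ++ '<' :: w) := by
              rw [hp, List.append_assoc]
              rw [findGt_append_gtFree tok hgt]
              simp [findGt]
            rw [goA_lt_some _ _ _ _ _ hfr]
            by_cases hval : ((PySem.Chars.strip tok).length == 1 &&
                PySem.Chars.strIsalpha (PySem.Chars.strip tok)) = true
            · rw [if_pos hval]
              have hla : (a ++ '<' :: w).length ≤ n := by
                rw [hp] at hlen; simp at hlen; simp; omega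
              rw [ih _ hla]
              rw [splitLt_append_noLt hlta, hw]
              simp [goB, hfp, hval, PySem.Chars.upper]
            · rw [if_neg hval]
              simp [goB, hfp, hval]
      · cases hsp : splitLt rest with
        | nil => exact absurd hsp (splitLt_ne_nil rest)
        | cons p ps =>
          have hsplit : splitLt (c :: rest) = (c :: p) :: ps := by
            simp [splitLt, hc, hsp]
          rw [hsplit]
          rw [goA_cons_ne _ _ _ _ hc]
          rw [ih rest (by simpa using hcs)]
          rw [hsp]
          simp [PySem.Chars.upper]

theorem parse_eq (raw_seq : String) :
    parse_annotated_sequence raw_seq = parse_annotated_sequence_alt raw_seq := by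
  unfold parse_annotated_sequence parse_annotated_sequence_alt
  cases h : splitLt (PySem.Str.strip raw_seq).toList with
  | nil => exact absurd h (splitLt_ne_nil _)
  | cons p ps =>
    have := goA_eq_goB (PySem.Str.strip raw_seq).toList.length _ le_rfl [] PySem.Dict.empty
    rw [this, h]
    simp

-- ===== VERDICT (by name: the statement is the Claim_ definition above) =====
theorem parse_annotated_sequence_spec : Claim_equal_parse_annotated_sequence := by
  intro raw_seq _ _
  unfold Spec_parse_annotated_sequence
  exact parse_eq raw_seq
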